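-- pv_equiv track=rewrite | github.com/meha001/leetcode | easy/equal-score-substrings.py | scoreBalance
-- ===== SOURCE A (Python) =====
-- def scoreBalance(s: str) -> bool:
--     n = len(s)
--
--     t = [0 for i in range(n)]
--     t[0] = ord(s[0]) - 96
--
--     for i in range(1, n):
--         t[i] = (ord(s[i]) - 96)
--
--     flag = 0
--     for i in range(n):
--         if sum(t[:i]) == sum(t[i:]):
--             flag = 1
--
--     return bool(flag)
-- ===== SOURCE B (Python) =====
-- def scoreBalance(s: str) -> bool:
--     # One pass: a split at i is balanced iff 2*prefix == total.
--     total = sum(ord(c) - 96 for c in s)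
--     left = 0
--     for c in s:
--         if 2 * left == total:
--             return True
--         left += ord(c) - 96
--     return False
-- ===== Notes on version B (the rewrite author's own statement) =====
-- stated objective: faster
-- what changed: Replaces the quadratic loop that re-sums both slices t[:i] and t[i:] for every split with a single pass keeping a running prefix sum and comparing 2*prefix to the precomputed total, with early exit.
import Mathlib
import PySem

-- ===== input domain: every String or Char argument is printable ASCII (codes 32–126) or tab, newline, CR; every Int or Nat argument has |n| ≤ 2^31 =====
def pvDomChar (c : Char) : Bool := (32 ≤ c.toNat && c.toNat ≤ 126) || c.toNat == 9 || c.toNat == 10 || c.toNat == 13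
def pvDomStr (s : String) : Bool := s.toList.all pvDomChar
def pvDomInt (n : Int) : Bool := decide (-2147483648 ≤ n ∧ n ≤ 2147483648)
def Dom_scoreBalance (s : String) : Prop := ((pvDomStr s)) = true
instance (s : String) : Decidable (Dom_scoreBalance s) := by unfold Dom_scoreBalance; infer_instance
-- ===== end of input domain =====

-- B replaces A's quadratic re-summing of both slices per split by one O(n) pass with a
-- running prefix sum compared against the precomputed total (objective: faster).

-- ===== PORT A =====
-- ord(c) - 96, used by both Pythons
def pvVal (c : Char) : Int := (c.toNat : Int) - 96

def scoreBalance (s : String) : Bool :=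
  let cs := s.toList
  let n : Int := cs.length
  let t0 : List Int := (PySem.List.pyRange 0 n 1).map (fun _ => 0)          -- t = [0 for i in range(n)]
  let t1 := PySem.List.pySetD t0 0 (pvVal (PySem.List.pyGetD cs 0 ' '))     -- t[0] = ord(s[0]) - 96
  let t := (PySem.List.pyRange 1 n 1).foldl                                  -- for i in range(1, n): t[i] = ord(s[i]) - 96
      (fun t i => PySem.List.pySetD t i (pvVal (PySem.List.pyGetD cs i ' '))) t1
  let flag := (PySem.List.pyRange 0 n 1).foldl                               -- for i in range(n): if sum(t[:i]) == sum(t[i:]): flag = 1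
      (fun flag i =>
        if (PySem.List.slice t none (some i)).sum = (PySem.List.slice t (some i) none).sum
        then (1 : Int) else flag) 0
  flag != 0                                                                  -- bool(flag)

-- ===== PORT B =====
-- the for-loop of Source B with its early return; `left` is the running prefix sum
def goAlt (total : Int) (left : Int) : List Char → Bool
  | [] => false
  | c :: rest => if 2 * left = total then true else goAlt total (left + pvVal c) rest

def scoreBalance_alt (s : String) : Bool :=
  let total := s.toList.foldl (fun a c => a + pvVal c) 0     -- sum(ord(c) - 96 for c in s)
  goAlt total 0 s.toList

-- ===== PRECONDITION & SPEC =====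
-- A raises IndexError on the empty string (it reads s[0]); Pre_ excludes exactly that input.
def Pre_scoreBalance (s : String) : Prop := s.toList ≠ []
instance (s : String) : Decidable (Pre_scoreBalance s) := by unfold Pre_scoreBalance; infer_instance
def pvWitness_scoreBalance : String := "ab"

def Spec_scoreBalance (s : String) (out : Bool) : Prop := out = scoreBalance_alt s
instance (s : String) (out : Bool) : Decidable (Spec_scoreBalance s out) := by unfold Spec_scoreBalance; infer_instance

-- ===== CLAIM (what is proved, stated in full; the proofs are below) =====
def Claim_equal_scoreBalance : Prop := ∀ (s : String), Dom_scoreBalance s → Pre_scoreBalance s → Spec_scoreBalance s (scoreBalance s)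

-- ===== LEMMAS AND PROOFS =====

-- the set-loop of A fills t with (cs.map pvVal)
theorem setloop_eq (cs : List Char) : ∀ (m : ℕ) (k : ℕ) (t : List Int),
    cs.length - k ≤ m → t.length = cs.length →
    (∀ j, j < k → t[j]? = (cs.map pvVal)[j]?) →
    (PySem.List.pyRange (k : Int) (cs.length : Int) 1).foldl
      (fun t i => PySem.List.pySetD t i (pvVal (PySem.List.pyGetD cs i ' '))) t
    = cs.map pvVal := by
  intro m
  induction m with
  | zero =>
    intro k t hm hlen hpref
    have hk : cs.length ≤ k := by omega
    rw [PySem.List.pyRange_one_eq_nil (by exact_mod_cast hk)]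
    simp only [List.foldl_nil]
    apply List.ext_getElem?
    intro j
    by_cases hj : j < k
    · exact hpref j hj
    · have h1 : t.length ≤ j := by omega
      have h2 : (cs.map pvVal).length ≤ j := by simp; omega
      rw [List.getElem?_eq_none h1, List.getElem?_eq_none h2]
  | succ m ih =>
    intro k t hm hlen hpref
    by_cases hk : k < cs.length
    · rw [PySem.List.pyRange_one_cons (by exact_mod_cast hk)]
      simp only [List.foldl_cons]
      have hcast : ((k : Int) + 1) = ((k + 1 : ℕ) : Int) := by push_cast; ring
      rw [hcast]
      apply ih (k + 1)
      · omega
      · simp [PySem.List.pySetD_natCast, hlen]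
      · intro j hj
        rw [PySem.List.pySetD_natCast, PySem.List.pyGetD_natCast]
        by_cases hjk : j = k
        · subst hjk
          rw [List.getElem?_set_self (by omega)]
          have : cs.getD j ' ' = cs[j] := List.getD_eq_getElem cs ' ' hk
          rw [this, List.getElem?_map, List.getElem?_eq_getElem hk]
          rfl
        · rw [List.getElem?_set_ne (by omega)]
          exact hpref j (by omega)
    · rw [PySem.List.pyRange_one_eq_nil (by exact_mod_cast (by omega : cs.length ≤ k))]
      simp only [List.foldl_nil]
      apply List.ext_getElem?
      intro j
      by_cases hj : j < k
      · exact hpref j hj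
      · have h1 : t.length ≤ j := by omega
        have h2 : (cs.map pvVal).length ≤ j := by simp; omega
        rw [List.getElem?_eq_none h1, List.getElem?_eq_none h2]

-- A's flag loop returns 1 iff some index in the list satisfies the test
theorem foldl_flag (p : Int → Prop) [DecidablePred p] :
    ∀ (L : List Int) (init : Int),
    L.foldl (fun f i => if p i then (1 : Int) else f) init
      = if (∃ x ∈ L, p x) then 1 else init := by
  intro L
  induction L with
  | nil => intro init; simp
  | cons a L ih =>
    intro init
    simp only [List.foldl_cons]
    by_cases ha : p a
    · rw [if_pos ha, ih 1]
      simp [ha]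
    · rw [if_neg ha, ih init]
      simp [ha]

-- B's loop returns true iff some prefix balances
theorem goAlt_iff : ∀ (l : List Char) (total left : Int),
    goAlt total left l = true ↔
      ∃ k, k < l.length ∧ 2 * (left + ((l.take k).map pvVal).sum) = total := by
  intro l
  induction l with
  | nil => intro total left; simp [goAlt]
  | cons c rest ih =>
    intro total left
    simp only [goAlt]
    by_cases h : 2 * left = total
    · simp only [if_pos h, true_iff]
      exact ⟨0, by simp, by simpa using h⟩
    · rw [if_neg h, ih]
      constructor
      · rintro ⟨k, hk, he⟩
        exact ⟨k + 1, by simpa using hk, by simp at he ⊢; linarith⟩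
      · rintro ⟨k, hk, he⟩
        cases k with
        | zero => exact absurd (by simpa using he) h
        | succ k => exact ⟨k, by simpa using hk, by simp at he ⊢; linarith⟩

-- sum over the foldl accumulator form
theorem foldl_val_sum (l : List Char) :
    l.foldl (fun a c => a + pvVal c) 0 = (l.map pvVal).sum := by
  rw [List.sum_eq_foldl, List.foldl_map]

-- ===== VERDICT (by name: the statement is the Claim_ definition above) =====
theorem scoreBalance_spec : Claim_equal_scoreBalance := by
  intro s _ hpre
  unfold Spec_scoreBalance scoreBalance scoreBalance_alt
  set cs := s.toList with hcs
  have hne : cs ≠ [] := hpre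
  have hlen0 : 0 < cs.length := List.length_pos_of_ne_nil hne
  -- the built array t equals cs.map pvVal
  have hbuild :
      (PySem.List.pyRange 1 (cs.length : Int) 1).foldl
        (fun t i => PySem.List.pySetD t i (pvVal (PySem.List.pyGetD cs i ' ')))
        (PySem.List.pySetD ((PySem.List.pyRange 0 (cs.length : Int) 1).map (fun _ => 0)) 0
          (pvVal (PySem.List.pyGetD cs 0 ' ')))
      = cs.map pvVal := by
    have h1 : ((1 : ℕ) : Int) = (1 : Int) := by norm_num
    rw [← h1]
    apply setloop_eq cs cs.length 1
    · omega
    · simp [PySem.List.pySetD_of_nonneg, PySem.List.length_pyRange_one]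
    · intro j hj
      interval_cases j
      have hlenr : ((PySem.List.pyRange 0 (cs.length : Int) 1).map (fun _ => (0:Int))).length = cs.length := by
        simp [PySem.List.length_pyRange_one]
      have h0 : (0 : Int) = ((0 : ℕ) : Int) := by norm_num
      rw [h0, PySem.List.pySetD_natCast, PySem.List.pyGetD_natCast]
      rw [List.getElem?_set_self (by simp [PySem.List.length_pyRange_one]; omega)]
      have : cs.getD 0 ' ' = cs[0] := List.getD_eq_getElem cs ' ' hlen0
      rw [this, List.getElem?_map, List.getElem?_eq_getElem hlen0]
      rfl
  simp only [hbuild]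
  set t := cs.map pvVal with ht
  -- A's result
  rw [foldl_flag (fun i => (PySem.List.slice t none (some i)).sum = (PySem.List.slice t (some i) none).sum)]
  -- characterize both sides as the same existential
  have hA : (∃ x ∈ PySem.List.pyRange 0 (cs.length : Int) 1,
        (PySem.List.slice t none (some x)).sum = (PySem.List.slice t (some x) none).sum)
      ↔ ∃ k, k < cs.length ∧ 2 * ((t.take k).sum) = t.sum := by
    constructor
    · rintro ⟨x, hx, he⟩
      rw [PySem.List.mem_pyRange_one] at hx
      refine ⟨x.toNat, by omega, ?_⟩
      rw [PySem.List.slice_to t hx.1, PySem.List.slice_from t hx.1] at he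
      have := List.sum_take_add_sum_drop t x.toNat
      omega
    · rintro ⟨k, hk, he⟩
      refine ⟨(k : Int), by rw [PySem.List.mem_pyRange_one]; omega, ?_⟩
      rw [PySem.List.slice_to t (by omega), PySem.List.slice_from t (by omega)]
      simp only [Int.toNat_natCast]
      have := List.sum_take_add_sum_drop t k
      omega
  have hB : goAlt (cs.foldl (fun a c => a + pvVal c) 0) 0 cs = true ↔
      ∃ k, k < cs.length ∧ 2 * ((t.take k).sum) = t.sum := by
    rw [goAlt_iff, foldl_val_sum]
    simp only [zero_add, ht, List.map_take]
  by_cases hex : ∃ k, k < cs.length ∧ 2 * ((t.take k).sum) = t.sum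
  · rw [if_pos (hA.mpr hex), hB.mpr hex]
    decide
  · rw [if_neg (fun h => hex (hA.mp h))]
    have hgo : goAlt (cs.foldl (fun a c => a + pvVal c) 0) 0 cs = false := by
      rcases Bool.eq_false_or_eq_true (goAlt (cs.foldl (fun a c => a + pvVal c) 0) 0 cs) with h | h
      · exact absurd (hB.mp h) hex
      · exact h
    rw [hgo]
    decide
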